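-- pv_equiv track=rewrite | github.com/charlieqf/onlytrade | scripts/content_factory/render_publish_t022_from_packages.py | _sanitize_token
-- ===== SOURCE A (Python) =====
-- from typing import Any, Dict, Iterable, List, Optional, Sequence, Tuple
--
-- def _sanitize_token(value: Any, fallback: str) -> str:
--     text = str(value or "").strip().lower()
--     out = []
--     for char in text:
--         if char.isalnum():
--             out.append(char)
--         else:
--             out.append("_")
--     token = "".join(out).strip("_")
--     while "__" in token:
--         token = token.replace("__", "_")
--     return token or fallback
-- ===== SOURCE B (Python) =====
-- def _sanitize_token(value, fallback):
--     text = str(value or "").strip().lower()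
--     out = []
--     prev_sep = False
--     for char in text:
--         if char.isalnum():
--             out.append(char)
--             prev_sep = False
--         else:
--             if not prev_sep:
--                 out.append("_")
--             prev_sep = True
--     token = "".join(out).strip("_")
--     return token or fallback
-- ===== Notes on version B (the rewrite author's own statement) =====
-- stated objective: simpler
-- what changed: One forward pass with a last-was-separator flag emits at most one '_' per run of non-alphanumeric characters, so the map-to-underscores pass and the whole `while '__' in token: replace` rescanning loop disappear.
import Mathlib
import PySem

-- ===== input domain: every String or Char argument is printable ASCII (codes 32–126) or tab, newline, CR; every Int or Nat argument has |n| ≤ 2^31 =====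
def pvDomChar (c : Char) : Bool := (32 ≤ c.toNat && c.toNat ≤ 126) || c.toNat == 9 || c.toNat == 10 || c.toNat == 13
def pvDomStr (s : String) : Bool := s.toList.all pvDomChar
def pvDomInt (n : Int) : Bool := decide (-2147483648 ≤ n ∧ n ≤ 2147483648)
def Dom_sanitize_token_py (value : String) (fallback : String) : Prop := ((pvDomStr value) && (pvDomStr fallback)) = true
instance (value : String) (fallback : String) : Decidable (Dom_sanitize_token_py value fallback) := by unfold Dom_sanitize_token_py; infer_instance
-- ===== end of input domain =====

-- B replaces A's map-everything-to-'_' pass plus the `while "__" in token: replace` rescanning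
-- loop by ONE forward pass with a last-was-separator flag (objective: simpler); return values only.

-- ===== PORT A =====
-- pvRep is the single left-to-right pass of Python's token.replace("__", "_");
-- proved equal to PySem.Chars.replace below, and cited by pvCollapseA's decreasing_by.
def pvRep : List Char → List Char
  | [] => []
  | [c] => [c]
  | a :: b :: r => if a = '_' ∧ b = '_' then '_' :: pvRep r else a :: pvRep (b :: r)

theorem pvRep_length_le (l : List Char) : (pvRep l).length ≤ l.length := by
  induction l using pvRep.induct with
  | case1 => simp [pvRep]
  | case2 c => simp [pvRep]
  | case3 a b r h ih =>
      simp only [pvRep, if_pos h, List.length_cons]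
      omega
  | case4 a b r h ih =>
      simp only [pvRep, if_neg h, List.length_cons]
      simp only [List.length_cons] at ih ⊢
      omega

theorem pvRep_length_lt (l : List Char) (h : ['_', '_'] <:+: l) :
    (pvRep l).length < l.length := by
  induction l using pvRep.induct with
  | case1 => exact absurd h.length_le (by simp)
  | case2 c => exact absurd h.length_le (by simp)
  | case3 a b r hab ih =>
      have hle := pvRep_length_le r
      simp only [pvRep, if_pos hab, List.length_cons]
      omega
  | case4 a b r hab ih =>
      have h' : ['_', '_'] <:+: (b :: r) := by
        rcases (List.infix_cons_iff).1 h with hp | hi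
        · obtain ⟨s, hs⟩ := hp
          simp only [List.cons_append] at hs
          injection hs with h1 hs2
          injection hs2 with h2 _
          exact absurd ⟨h1.symm, h2.symm⟩ hab
        · exact hi
      have := ih h'
      simp only [pvRep, if_neg hab, List.length_cons]
      simp only [List.length_cons] at this ⊢
      omega

theorem pvReplace_go_eq (fuel : Nat) : ∀ (l acc : List Char), l.length ≤ fuel →
    PySem.Chars.replace.go ['_', '_'] ['_'] fuel l acc = acc.reverse ++ pvRep l := by
  induction fuel with
  | zero =>
      intro l acc h
      have : l = [] := List.length_eq_zero_iff.1 (Nat.le_zero.1 h)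
      subst this; simp [PySem.Chars.replace.go, pvRep]
  | succ fuel ih =>
      intro l acc h
      match l with
      | [] => simp [PySem.Chars.replace.go, pvRep]
      | c :: t =>
          rw [PySem.Chars.replace.go]
          by_cases hp : List.isPrefixOf ['_', '_'] (c :: t) = true
          · rw [if_pos hp]
            match t, hp with
            | [], hp => simp [List.isPrefixOf] at hp
            | d :: t', hp =>
                have hc : '_' = c ∧ '_' = d := by
                  simpa [List.isPrefixOf] using hp
                obtain ⟨hc1, hc2⟩ := hc
                subst hc1; subst hc2
                have hlen : t'.length ≤ fuel := by
                  simp at h; omega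
                rw [show List.drop (['_', '_'] : List Char).length ('_' :: '_' :: t') = t' from rfl,
                  show (['_'] : List Char).reverse ++ acc = '_' :: acc from rfl,
                  ih _ _ hlen]
                simp [pvRep]
          · rw [if_neg hp]
            have hlen : t.length ≤ fuel := by simp at h; omega
            rw [ih _ _ hlen]
            have hrep : pvRep (c :: t) = c :: pvRep t := by
              match t with
              | [] => simp [pvRep]
              | d :: t' =>
                  have : ¬ (c = '_' ∧ d = '_') := by
                    intro ⟨h1, h2⟩; subst h1; subst h2
                    exact hp (by simp [List.isPrefixOf])
                  simp [pvRep, this]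
            simp [hrep]

theorem pvReplace_eq_pvRep (t : List Char) :
    PySem.Chars.replace t ['_', '_'] ['_'] = pvRep t := by
  rw [PySem.Chars.replace]
  simp only [List.isEmpty_cons, if_false, Bool.false_eq_true]
  simpa using pvReplace_go_eq t.length t [] le_rfl

-- the `while "__" in token: token = token.replace("__", "_")` loop, verbatim
def pvCollapseA (t : List Char) : List Char :=
  if PySem.Chars.isIn ['_', '_'] t then pvCollapseA (PySem.Chars.replace t ['_', '_'] ['_']) else t
termination_by t.length
decreasing_by
  rw [pvReplace_eq_pvRep]
  exact pvRep_length_lt t ((PySem.Chars.isIn_iff_infix _ _).1 (by assumption))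

def pvAStep (acc : List Char) (c : Char) : List Char :=
  if PySem.Chars.isalnum c then acc ++ [c] else acc ++ ['_']

def sanitize_token_py (value : String) (fallback : String) : String :=
  -- text = str(value or "").strip().lower()  ('str(value or "")' is 'value' itself for a str)
  let text := PySem.Chars.lower (PySem.Chars.strip value.toList)
  let out := text.foldl pvAStep []
  let token := PySem.Chars.stripChars out ['_']
  let token := pvCollapseA token
  if token.isEmpty then fallback else String.ofList token

-- ===== PORT B =====
def pvBStep (st : List Char × Bool) (c : Char) : List Char × Bool :=
  if PySem.Chars.isalnum c then (st.1 ++ [c], false)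
  else if st.2 then st else (st.1 ++ ['_'], true)

def sanitize_token_py_alt (value : String) (fallback : String) : String :=
  let text := PySem.Chars.lower (PySem.Chars.strip value.toList)
  let st := text.foldl pvBStep (([] : List Char), false)
  let token := PySem.Chars.stripChars st.1 ['_']
  if token.isEmpty then fallback else String.ofList token

-- ===== PRECONDITION & SPEC =====
def Spec_sanitize_token_py (value : String) (fallback : String) (out : String) : Prop := out = sanitize_token_py_alt value fallback
instance (value : String) (fallback : String) (out : String) : Decidable (Spec_sanitize_token_py value fallback out) := by unfold Spec_sanitize_token_py; infer_instance

-- ===== CLAIM (what is proved, stated in full; the proofs are below) =====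
def Claim_equal_sanitize_token_py : Prop := ∀ (value : String) (fallback : String), Dom_sanitize_token_py value fallback → Spec_sanitize_token_py value fallback (sanitize_token_py value fallback)

-- ===== LEMMAS AND PROOFS =====

-- collapse every run of '_' to a single '_': common abstraction of A's while-loop and B's flag pass
def pvSqueeze : List Char → List Char
  | [] => []
  | [c] => [c]
  | a :: b :: r => if a = '_' ∧ b = '_' then pvSqueeze (b :: r) else a :: pvSqueeze (b :: r)

def pvF (c : Char) : Char := if PySem.Chars.isalnum c then c else '_'

theorem pvSqueeze_cons (a : Char) (x : List Char) :
    pvSqueeze (a :: x) = if a = '_' ∧ x.head? = some '_' then pvSqueeze x else a :: pvSqueeze x := by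
  match x with
  | [] => simp [pvSqueeze]
  | b :: x' => simp [pvSqueeze]

theorem pvSqueeze_snoc (s : List Char) (a : Char) :
    pvSqueeze (s ++ [a]) =
      if s.getLast? = some '_' ∧ a = '_' then pvSqueeze s else pvSqueeze s ++ [a] := by
  induction s using pvSqueeze.induct with
  | case1 => simp [pvSqueeze]
  | case2 b => by_cases h : b = '_' ∧ a = '_' <;> simp [pvSqueeze, h]
  | case3 b c s' h ih =>
      rw [List.cons_append, List.cons_append,
          show pvSqueeze (b :: (c :: (s' ++ [a]))) = pvSqueeze (c :: (s' ++ [a])) from by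
            simp only [pvSqueeze, if_pos h],
          ← List.cons_append, ih,
          show pvSqueeze (b :: c :: s') = pvSqueeze (c :: s') from by
            simp only [pvSqueeze, if_pos h],
          List.getLast?_cons_cons]
  | case4 b c s' h ih =>
      rw [List.cons_append, List.cons_append,
          show pvSqueeze (b :: (c :: (s' ++ [a]))) = b :: pvSqueeze (c :: (s' ++ [a])) from by
            simp only [pvSqueeze, if_neg h],
          ← List.cons_append, ih,
          show pvSqueeze (b :: c :: s') = b :: pvSqueeze (c :: s') from by
            simp only [pvSqueeze, if_neg h],
          List.getLast?_cons_cons]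
      split_ifs <;> simp

theorem pvSqueeze_reverse (l : List Char) : pvSqueeze l.reverse = (pvSqueeze l).reverse := by
  induction l with
  | nil => simp [pvSqueeze]
  | cons a t ih =>
      rw [List.reverse_cons, pvSqueeze_snoc, List.getLast?_reverse, pvSqueeze_cons]
      by_cases h : a = '_' ∧ t.head? = some '_'
      · rw [if_pos ⟨h.2, h.1⟩, if_pos h, ih]
      · rw [if_neg (fun hh => h ⟨hh.2, hh.1⟩), if_neg h, ih, List.reverse_cons]

theorem pvSqueeze_dropWhile (l : List Char) :
    pvSqueeze (l.dropWhile (fun c => List.contains ['_'] c)) =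
      (pvSqueeze l).dropWhile (fun c => List.contains ['_'] c) := by
  induction l with
  | nil => simp [pvSqueeze]
  | cons a t ih =>
      by_cases ha : a = '_'
      · subst ha
        rw [List.dropWhile_cons_of_pos (by simp), pvSqueeze_cons]
        by_cases h : t.head? = some '_'
        · rw [if_pos ⟨rfl, h⟩, ih]
        · rw [if_neg (fun hh => h hh.2), List.dropWhile_cons_of_pos (by simp), ih]
      · rw [List.dropWhile_cons_of_neg (by simpa using ha), pvSqueeze_cons,
          if_neg (fun hh => ha hh.1), List.dropWhile_cons_of_neg (by simpa using ha)]

theorem pvSqueeze_stripChars (m : List Char) :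
    pvSqueeze (PySem.Chars.stripChars m ['_']) = PySem.Chars.stripChars (pvSqueeze m) ['_'] := by
  simp only [PySem.Chars.stripChars]
  rw [pvSqueeze_reverse, pvSqueeze_dropWhile, pvSqueeze_reverse, pvSqueeze_dropWhile]

theorem pvRep_head? (l : List Char) : (pvRep l).head? = l.head? := by
  induction l using pvRep.induct with
  | case1 => simp [pvRep]
  | case2 c => simp [pvRep]
  | case3 a b r h ih =>
      obtain ⟨h1, h2⟩ := h; subst h1; subst h2
      simp [pvRep]
  | case4 a b r h ih => simp [pvRep, if_neg h]

theorem pvSqueeze_pvRep (l : List Char) : pvSqueeze (pvRep l) = pvSqueeze l := by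
  induction l using pvRep.induct with
  | case1 => simp [pvRep]
  | case2 c => simp [pvRep]
  | case3 a b r h ih =>
      obtain ⟨h1, h2⟩ := h; subst h1; subst h2
      rw [show pvRep ('_' :: '_' :: r) = '_' :: pvRep r from by simp [pvRep],
          show pvSqueeze ('_' :: '_' :: r) = pvSqueeze ('_' :: r) from by simp [pvSqueeze],
          pvSqueeze_cons, pvSqueeze_cons, pvRep_head?, ih]
  | case4 a b r h ih =>
      rw [show pvRep (a :: b :: r) = a :: pvRep (b :: r) from by simp [pvRep, if_neg h],
          pvSqueeze_cons, pvSqueeze_cons, pvRep_head?, ih]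

theorem pvSqueeze_of_not_infix (t : List Char) :
    ¬ (['_', '_'] <:+: t) → pvSqueeze t = t := by
  induction t using pvSqueeze.induct with
  | case1 => intro _; simp [pvSqueeze]
  | case2 c => intro _; simp [pvSqueeze]
  | case3 a b r hab ih =>
      intro h
      obtain ⟨h1, h2⟩ := hab; subst h1; subst h2
      exact absurd (List.infix_cons_iff.2 (Or.inl ⟨r, rfl⟩)) h
  | case4 a b r hab ih =>
      intro h
      have h' : ¬ (['_', '_'] <:+: (b :: r)) :=
        fun hi => h (List.infix_cons_iff.2 (Or.inr hi))
      simp only [pvSqueeze, if_neg hab, ih h']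

theorem pvCollapseA_eq_pvSqueeze (t : List Char) : pvCollapseA t = pvSqueeze t := by
  induction t using pvCollapseA.induct with
  | case1 t h ih =>
      rw [pvCollapseA, if_pos h, ih, pvReplace_eq_pvRep, pvSqueeze_pvRep]
  | case2 t h =>
      rw [pvCollapseA, if_neg h]
      exact (pvSqueeze_of_not_infix t
        (fun hi => h ((PySem.Chars.isIn_iff_infix _ _).2 hi))).symm

theorem pvAStep_fold (l : List Char) : ∀ acc : List Char,
    l.foldl pvAStep acc = acc ++ l.map pvF := by
  induction l with
  | nil => simp
  | cons c t ih =>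
      intro acc
      by_cases h : PySem.Chars.isalnum c = true <;>
        simp [pvAStep, pvF, h, ih]

theorem pvF_alnum {c : Char} (h : PySem.Chars.isalnum c = true) : c ≠ '_' := by
  intro hc; subst hc; exact absurd h (by decide)

theorem pvBStep_fold (l : List Char) : ∀ q : List Char,
    l.foldl pvBStep (pvSqueeze q, (q.getLast? == some '_')) =
      (pvSqueeze (q ++ l.map pvF), ((q ++ l.map pvF).getLast? == some '_')) := by
  induction l with
  | nil => simp
  | cons c t ih =>
      intro q
      have step : pvBStep (pvSqueeze q, (q.getLast? == some '_')) c =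
          (pvSqueeze (q ++ [pvF c]), ((q ++ [pvF c]).getLast? == some '_')) := by
        by_cases h : PySem.Chars.isalnum c = true
        · have hc : c ≠ '_' := pvF_alnum h
          simp [pvBStep, pvF, h, pvSqueeze_snoc, hc]
        · by_cases hq : q.getLast? = some '_'
          · simp [pvBStep, h, hq, pvSqueeze_snoc, pvF]
          · simp [pvBStep, h, hq, pvSqueeze_snoc, pvF]
      rw [List.foldl_cons, step, ih (q ++ [pvF c])]
      simp

theorem pvTokens_eq (m : List Char) :
    pvCollapseA (PySem.Chars.stripChars (m.foldl pvAStep []) ['_']) =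
      PySem.Chars.stripChars (m.foldl pvBStep ([], false)).1 ['_'] := by
  have hB : m.foldl pvBStep ([], false) =
      (pvSqueeze (m.map pvF), ((m.map pvF).getLast? == some '_')) := by
    simpa [pvSqueeze] using pvBStep_fold m []
  rw [pvAStep_fold m [], hB, pvCollapseA_eq_pvSqueeze, List.nil_append,
    pvSqueeze_stripChars]

-- ===== VERDICT (by name: the statement is the Claim_ definition above) =====
theorem sanitize_token_py_spec : Claim_equal_sanitize_token_py := by
  intro value fallback _
  unfold Spec_sanitize_token_py sanitize_token_py sanitize_token_py_alt
  exact congrArg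
    (fun token : List Char => if token.isEmpty = true then fallback else String.ofList token)
    (pvTokens_eq (PySem.Chars.lower (PySem.Chars.strip value.toList)))
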